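-- pv_equiv track=rewrite | github.com/balmerblake/codewars | 6kyu/sort_by_contiguous_vowels.py | sort_strings_by_vowels
-- ===== SOURCE A (Python) =====
-- def sort_strings_by_vowels(seq):
--     counts = []
--     v_count = 0
--     mv_count = 0
--     vowels = ['a','e','i','o','u','A','E','I','O','U']
--
--     for sent in seq:
--         for char in sent:
--             #Each time a vowel is encountered, add to the counter
--             #If the counter is greater than the current max counter for the string
--             #Change the max counter to the new count
--             if char in vowels:
--                 v_count += 1
--                 if v_count > mv_count:
--                     mv_count = v_count
--             #If a non-vowel is encountered, reset the current counter
--             else: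
--                 v_count = 0
--         #After all characters are traversed,
--         #append the sentence and count to a list
--         #reset the counter and max count
--         counts.append([sent, mv_count])
--         v_count = 0
--         mv_count = 0
--
--     #sort the list of sentence/counts by the count value, with reverse to keep stable
--     counts.sort(key=lambda x : x[1], reverse = True)
--
--     #return the list of sentences after sorting
--     return [sent[0] for sent in counts]
--     pass
-- ===== SOURCE B (Python) =====
-- VOWELS = set('aeiouAEIOU')
--
-- def _longest_vowel_run(s):
--     # blank out non-vowels, split on whitespace: pieces are the maximal vowel runs
--     masked = ''.join(c if c in VOWELS else ' ' for c in s)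
--     return max((len(w) for w in masked.split()), default=0)
--
-- def sort_strings_by_vowels(seq):
--     return sorted(seq, key=_longest_vowel_run, reverse=True)
-- ===== Notes on version B (the rewrite author's own statement) =====
-- stated objective: simpler
-- what changed: B replaces A's explicit pair-building loop with stateful run/max counters plus a manual sort of [string,count] pairs by a single sorted(seq, key=..., reverse=True) whose key blanks out non-vowels and splits the masked string into whitespace-separated pieces (the maximal vowel runs), taking the max piece length with default 0.
import Mathlib
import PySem

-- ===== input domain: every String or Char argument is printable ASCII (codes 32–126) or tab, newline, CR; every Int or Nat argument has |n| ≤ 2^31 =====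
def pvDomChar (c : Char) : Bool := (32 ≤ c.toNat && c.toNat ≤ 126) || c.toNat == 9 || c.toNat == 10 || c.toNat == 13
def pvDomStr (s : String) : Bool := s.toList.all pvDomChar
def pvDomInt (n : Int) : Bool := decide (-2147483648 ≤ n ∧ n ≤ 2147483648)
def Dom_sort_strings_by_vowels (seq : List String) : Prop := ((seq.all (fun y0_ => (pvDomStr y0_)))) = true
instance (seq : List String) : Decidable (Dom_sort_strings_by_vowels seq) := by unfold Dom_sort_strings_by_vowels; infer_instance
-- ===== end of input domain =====

-- B keys each string by blanking non-vowels and splitting on whitespace instead of A's stateful counter loop; objective: simpler (same cost).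

-- ===== PORT A =====
def pvVowelsA : List Char := ['a','e','i','o','u','A','E','I','O','U']

-- the body of A's inner character loop, state = (v_count, mv_count)
def pvStepA (p : Int × Int) (c : Char) : Int × Int :=
  if c ∈ pvVowelsA then
    let v := p.1 + 1
    (v, if v > p.2 then v else p.2)
  else (0, p.2)

-- A's outer loop: build the [sent, mv_count] list, resetting both counters after each sentence
def pvCountsA (seq : List String) : List (String × Int) :=
  (seq.foldl (fun (st : List (String × Int) × (Int × Int)) sent =>
      let p := sent.toList.foldl pvStepA st.2
      (st.1 ++ [(sent, p.2)], (0, 0))) ([], (0, 0))).1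

def sort_strings_by_vowels (seq : List String) : List String :=
  (PySem.List.sorted (pvCountsA seq) (fun x => x.2) true).map (fun x => x.1)

-- ===== PORT B =====
def pvVowelsB : List Char := "aeiouAEIOU".toList

-- ''.join(c if c in VOWELS else ' ' for c in s)
def pvMask (cs : List Char) : List Char := cs.map (fun c => if c ∈ pvVowelsB then c else ' ')

-- max((len(w) for w in masked.split()), default=0)
def pvKeyB (s : String) : Int :=
  PySem.List.maxD ((PySem.Chars.split₀ (pvMask s.toList)).map (fun w => (w.length : Int)))
    (fun x => x) 0

def sort_strings_by_vowels_alt (seq : List String) : List String :=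
  PySem.List.sorted seq pvKeyB true

-- ===== PRECONDITION & SPEC =====
def Spec_sort_strings_by_vowels (seq : List String) (out : List String) : Prop := out = sort_strings_by_vowels_alt seq
instance (seq : List String) (out : List String) : Decidable (Spec_sort_strings_by_vowels seq out) := by unfold Spec_sort_strings_by_vowels; infer_instance

-- ===== CLAIM (what is proved, stated in full; the proofs are below) =====
def Claim_equal_sort_strings_by_vowels : Prop := ∀ (seq : List String), Dom_sort_strings_by_vowels seq → Spec_sort_strings_by_vowels seq (sort_strings_by_vowels seq)

-- ===== LEMMAS AND PROOFS =====

-- reference: lengths of the maximal vowel runs of cs, given an open run of length cur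
def pvVruns : List Char → Nat → List Int
  | [], cur => if cur = 0 then [] else [(cur : Int)]
  | c :: cs, cur =>
    if c ∈ pvVowelsA then pvVruns cs (cur + 1)
    else if cur = 0 then pvVruns cs 0 else (cur : Int) :: pvVruns cs 0

def pvMaxIn : List Int → Int → Int
  | [], m => m
  | x :: l, m => pvMaxIn l (max m x)

lemma pvMaxIn_mono : ∀ (l : List Int) (m : Int), m ≤ pvMaxIn l m := by
  intro l
  induction l with
  | nil => intro m; simp [pvMaxIn]
  | cons x l ih => intro m; exact le_trans (le_max_left m x) (ih (max m x))

lemma pvMaxIn_max : ∀ (l : List Int) (a b : Int), pvMaxIn l (max a b) = max (pvMaxIn l a) b := by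
  intro l
  induction l with
  | nil => intro a b; simp [pvMaxIn]
  | cons x l ih =>
    intro a b
    simp only [pvMaxIn]
    rw [max_right_comm a b x]
    exact ih (max a x) b

lemma pvVruns_lb : ∀ (cs : List Char) (v : Nat) (m : Int), 0 < v →
    (v : Int) ≤ pvMaxIn (pvVruns cs v) m := by
  intro cs
  induction cs with
  | nil =>
    intro v m hv
    simp only [pvVruns, if_neg (by omega : ¬ v = 0), pvMaxIn]
    exact le_max_right m v
  | cons c cs ih =>
    intro v m hv
    by_cases hc : c ∈ pvVowelsA
    · simp only [pvVruns, if_pos hc]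
      exact le_trans (by exact_mod_cast Nat.le_succ v) (ih (v + 1) m (by omega))
    · simp only [pvVruns, if_neg hc, if_neg (by omega : ¬ v = 0), pvMaxIn]
      exact le_trans (le_max_right m v) (pvMaxIn_mono _ _)

lemma pvFoldA_eq : ∀ (cs : List Char) (v : Nat) (mv : Int), (v : Int) ≤ mv →
    (cs.foldl pvStepA ((v : Int), mv)).2 = pvMaxIn (pvVruns cs v) mv := by
  intro cs
  induction cs with
  | nil =>
    intro v mv hvm
    by_cases hv : v = 0
    · subst hv; simp [pvVruns, pvMaxIn]
    · simp only [List.foldl_nil, pvVruns, if_neg hv, pvMaxIn]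
      omega
  | cons c cs ih =>
    intro v mv hvm
    by_cases hc : c ∈ pvVowelsA
    · have hstep : pvStepA ((v : Int), mv) c = (((v + 1 : Nat) : Int), max mv ((v + 1 : Nat) : Int)) := by
        simp only [pvStepA, if_pos hc]
        rw [Prod.mk.injEq]
        push_cast
        refine ⟨rfl, ?_⟩
        rw [max_def]
        split_ifs <;> omega
      rw [List.foldl_cons, hstep, ih (v + 1) _ (le_max_right _ _)]
      simp only [pvVruns, if_pos hc]
      rw [pvMaxIn_max]
      exact max_eq_left (pvVruns_lb cs (v + 1) mv (by omega))
    · have hstep : pvStepA ((v : Int), mv) c = (((0 : Nat) : Int), mv) := by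
        simp [pvStepA, if_neg hc]
      rw [List.foldl_cons, hstep, ih 0 mv (by omega)]
      simp only [pvVruns, if_neg hc]
      by_cases hv : v = 0
      · subst hv; simp
      · simp only [if_neg hv, pvMaxIn]
        rw [max_eq_left (by omega : ((v : Nat) : Int) ≤ mv)]

-- A's per-string count
def pvKeyA (s : String) : Int := (s.toList.foldl pvStepA (0, 0)).2

lemma pvVowelsB_eq : pvVowelsB = pvVowelsA := by decide

lemma pvVowel_not_space : ∀ c ∈ pvVowelsA, PySem.Chars.isspace c = false := by
  intro c hc; fin_cases hc <;> decide

lemma pvGo_mask : ∀ (cs cur : List Char) (acc : List (List Char)),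
    (PySem.Chars.split₀.go (pvMask cs) cur acc).map (fun w => (w.length : Int)) =
      (acc.reverse.map (fun w => (w.length : Int))) ++ pvVruns cs cur.length := by
  intro cs
  induction cs with
  | nil =>
    intro cur acc
    by_cases h : cur = []
    · subst h
      simp [pvMask, PySem.Chars.split₀.go, pvVruns]
    · have hne : cur.isEmpty = false := by simpa [List.isEmpty_iff] using h
      simp [pvMask, PySem.Chars.split₀.go, hne, pvVruns, List.length_eq_zero_iff, h]
  | cons c cs ih =>
    intro cur acc
    by_cases hc : c ∈ pvVowelsA
    · have hmask : pvMask (c :: cs) = c :: pvMask cs := by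
        simp [pvMask, pvVowelsB_eq, hc]
      rw [hmask]
      simp only [PySem.Chars.split₀.go, pvVowel_not_space c hc, Bool.false_eq_true, if_false]
      rw [ih (c :: cur) acc]
      simp only [pvVruns, if_pos hc, List.length_cons]
    · have hmask : pvMask (c :: cs) = ' ' :: pvMask cs := by
        simp [pvMask, pvVowelsB_eq, hc]
      rw [hmask]
      have hsp : PySem.Chars.isspace ' ' = true := by decide
      by_cases h : cur = []
      · subst h
        simp only [PySem.Chars.split₀.go, hsp, if_true, List.isEmpty_nil]
        rw [ih [] acc]
        simp [pvVruns, hc]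
      · have hne : cur.isEmpty = false := by simpa [List.isEmpty_iff] using h
        simp only [PySem.Chars.split₀.go, hsp, if_true, hne, Bool.false_eq_true, if_false]
        rw [ih [] (cur.reverse :: acc)]
        simp only [pvVruns, if_neg hc, if_neg (by simpa [List.length_eq_zero_iff] using h : ¬ cur.length = 0)]
        simp [List.map_append]

lemma pvVruns_pos : ∀ (cs : List Char) (v : Nat), ∀ x ∈ pvVruns cs v, 1 ≤ x := by
  intro cs
  induction cs with
  | nil =>
    intro v x hx
    by_cases h : v = 0
    · subst h; simp [pvVruns] at hx
    · simp only [pvVruns, if_neg h, List.mem_singleton] at hx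
      subst hx; exact_mod_cast Nat.one_le_iff_ne_zero.mpr h
  | cons c cs ih =>
    intro v x hx
    by_cases hc : c ∈ pvVowelsA
    · simp only [pvVruns, if_pos hc] at hx
      exact ih _ x hx
    · simp only [pvVruns, if_neg hc] at hx
      by_cases h : v = 0
      · rw [if_pos h] at hx; exact ih 0 x hx
      · rw [if_neg h] at hx
        rcases List.mem_cons.mp hx with h' | h'
        · subst h'; exact_mod_cast Nat.one_le_iff_ne_zero.mpr h
        · exact ih 0 x h'

lemma pvMax?_eq : ∀ (l : List Int) (a : Int),
    PySem.List.max? (a :: l) (fun x => x) = some (pvMaxIn l a) := by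
  intro l
  induction l with
  | nil => intro a; simp [PySem.List.max?, pvMaxIn]
  | cons x l ih =>
    intro a
    have h1 : PySem.List.max? (a :: x :: l) (fun y => y)
        = PySem.List.max? ((if a < x then x else a) :: l) (fun y => y) := by
      simp only [PySem.List.max?, List.foldl_cons]
      by_cases h : a < x <;> simp [h]
    rw [h1]
    by_cases h : a < x
    · rw [if_pos h, ih x]
      simp [pvMaxIn, max_eq_right (le_of_lt h)]
    · rw [if_neg h, ih a]
      simp [pvMaxIn, max_eq_left (by omega : x ≤ a)]

lemma pvKeyB_eq_maxIn (s : String) : pvKeyB s = pvMaxIn (pvVruns s.toList 0) 0 := by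
  have h := pvGo_mask s.toList [] []
  simp only [List.reverse_nil, List.map_nil, List.nil_append, List.length_nil] at h
  unfold pvKeyB PySem.List.maxD
  simp only [PySem.Chars.split₀]
  rw [h]
  cases hv : pvVruns s.toList 0 with
  | nil => simp [PySem.List.max?, pvMaxIn]
  | cons a l =>
    have ha : 1 ≤ a := pvVruns_pos s.toList 0 a (by rw [hv]; exact List.mem_cons_self)
    rw [pvMax?_eq l a]
    simp only [Option.getD_some, pvMaxIn]
    rw [max_eq_right (by omega : (0 : Int) ≤ a)]

lemma pvKeyA_eq_keyB (s : String) : pvKeyA s = pvKeyB s := by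
  rw [pvKeyB_eq_maxIn]
  exact pvFoldA_eq s.toList 0 0 le_rfl

-- A's counts list is the key-pair image of seq
lemma pvCounts_eq : ∀ (seq : List String) (acc : List (String × Int)),
    (seq.foldl (fun (st : List (String × Int) × (Int × Int)) sent =>
      let p := sent.toList.foldl pvStepA st.2
      (st.1 ++ [(sent, p.2)], (0, 0))) (acc, (0, 0))).1
    = acc ++ seq.map (fun s => (s, pvKeyA s)) := by
  intro seq
  induction seq with
  | nil => intro acc; simp
  | cons s seq ih =>
    intro acc
    simp only [List.foldl_cons, List.map_cons]
    rw [ih (acc ++ [(s, (s.toList.foldl pvStepA (0, 0)).2)])]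
    simp [pvKeyA]

lemma pvInsertBy_pair (k : String → Int) (x : String) : ∀ (ys : List String),
    PySem.List.insertBy (fun a b => decide (b.2 < a.2)) (x, k x) (ys.map (fun s => (s, k s)))
      = (PySem.List.insertBy (fun a b => decide (k b < k a)) x ys).map (fun s => (s, k s)) := by
  intro ys
  induction ys with
  | nil => simp [PySem.List.insertBy]
  | cons y ys ih =>
    simp only [List.map_cons, PySem.List.insertBy]
    by_cases h : k y < k x
    · simp [h]
    · simp only [decide_eq_true_eq, if_neg h, List.map_cons]
      rw [ih]

lemma pvSorted_pair (k : String → Int) : ∀ (seq ys : List String),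
    (List.foldl (fun acc x => PySem.List.insertBy (fun a b => decide (b.2 < a.2)) x acc)
        (ys.map (fun s => (s, k s))) (seq.map (fun s => (s, k s)))).map (fun p => p.1)
    = List.foldl (fun acc x => PySem.List.insertBy (fun a b => decide (k b < k a)) x acc) ys seq := by
  intro seq
  induction seq with
  | nil =>
    intro ys; simp [Function.comp_def]
  | cons s seq ih =>
    intro ys
    simp only [List.map_cons, List.foldl_cons]
    rw [pvInsertBy_pair k s ys, ih (PySem.List.insertBy (fun a b => decide (k b < k a)) s ys)]

-- ===== VERDICT (by name: the statement is the Claim_ definition above) =====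
theorem sort_strings_by_vowels_spec : Claim_equal_sort_strings_by_vowels := by
  intro seq _
  unfold Spec_sort_strings_by_vowels sort_strings_by_vowels sort_strings_by_vowels_alt pvCountsA
  rw [pvCounts_eq seq []]
  simp only [List.nil_append]
  have hk : (fun s => (s, pvKeyA s)) = (fun s => (s, pvKeyB s)) := by
    funext s; rw [pvKeyA_eq_keyB]
  rw [hk]
  unfold PySem.List.sorted
  simpa using pvSorted_pair pvKeyB seq []
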